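-- pv_equiv track=rewrite | github.com/zMath3usMSF/Blender-NUC-Importer | sraw_reader.py | _unswizzle_palette
-- ===== SOURCE A (Python) =====
-- def _unswizzle_palette(palette_rgba: list) -> list:
--     if len(palette_rgba) != 256:
--         return palette_rgba
--     out = [None] * 256
--     j = 0
--     for i in range(0, 256, 32):
--         out[i:i+8]    = palette_rgba[j:j+8]
--         out[i+16:i+24] = palette_rgba[j+8:j+16]
--         out[i+8:i+16]  = palette_rgba[j+16:j+24]
--         out[i+24:i+32] = palette_rgba[j+24:j+32]
--         j += 32
--     return out
-- ===== SOURCE B (Python) =====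
-- def _unswizzle_palette(palette_rgba: list) -> list:
--     if len(palette_rgba) != 256:
--         return palette_rgba
--     def src(i):
--         local = i % 32
--         if 8 <= local < 16:
--             return i + 8
--         if 16 <= local < 24:
--             return i - 8
--         return i
--     perm = [src(i) for i in range(256)]
--     return [palette_rgba[p] for p in perm]
-- ===== Notes on version B (the rewrite author's own statement) =====
-- stated objective: alternative
-- what changed: Replaces the four-slice-copies-per-block loop over eight 32-entry blocks by building a 256-entry index permutation once and applying it in a single element-wise pass.
import Mathlib
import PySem

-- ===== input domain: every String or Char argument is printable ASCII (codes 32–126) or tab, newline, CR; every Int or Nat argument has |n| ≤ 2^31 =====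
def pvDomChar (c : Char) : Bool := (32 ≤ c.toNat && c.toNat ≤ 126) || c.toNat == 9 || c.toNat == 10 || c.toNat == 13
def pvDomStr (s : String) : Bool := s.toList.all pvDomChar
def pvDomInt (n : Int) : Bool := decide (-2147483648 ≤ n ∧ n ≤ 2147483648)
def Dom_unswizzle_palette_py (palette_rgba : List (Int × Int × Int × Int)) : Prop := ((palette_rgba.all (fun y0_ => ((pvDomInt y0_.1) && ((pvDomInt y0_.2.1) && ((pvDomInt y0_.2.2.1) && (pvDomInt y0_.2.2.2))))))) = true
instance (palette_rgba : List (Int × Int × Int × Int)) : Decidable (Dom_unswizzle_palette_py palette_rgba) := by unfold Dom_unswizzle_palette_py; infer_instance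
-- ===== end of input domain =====

-- B builds the 256-entry unswizzle index permutation once and applies it in one element-wise pass,
-- instead of A's four slice copies per 32-entry block (objective: alternative decomposition).

-- ===== PORT A =====
-- Python slice assignment out[a:b] = seg; exact for 0 ≤ a ≤ b ≤ len out with len seg = b - a,
-- which holds at every use below (block indices 0..256 into a 256-long list).
def pvSliceAssign (xs : List (Int × Int × Int × Int)) (a b : Nat) (seg : List (Int × Int × Int × Int)) : List (Int × Int × Int × Int) :=
  xs.take a ++ seg ++ xs.drop b

-- the body of A's `for i in range(0, 256, 32)` loop, acting on the state (out, j)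
def pvStepA (pal : List (Int × Int × Int × Int)) (st : List (Int × Int × Int × Int) × Int) (i : Int) :
    List (Int × Int × Int × Int) × Int :=
  let out := st.1
  let j := st.2
  let out := pvSliceAssign out i.toNat (i + 8).toNat (PySem.List.slice pal (some j) (some (j + 8)))
  let out := pvSliceAssign out (i + 16).toNat (i + 24).toNat (PySem.List.slice pal (some (j + 8)) (some (j + 16)))
  let out := pvSliceAssign out (i + 8).toNat (i + 16).toNat (PySem.List.slice pal (some (j + 16)) (some (j + 24)))
  let out := pvSliceAssign out (i + 24).toNat (i + 32).toNat (PySem.List.slice pal (some (j + 24)) (some (j + 32)))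
  (out, j + 32)

def unswizzle_palette_py (palette_rgba : List (Int × Int × Int × Int)) : List (Int × Int × Int × Int) :=
  if palette_rgba.length ≠ 256 then palette_rgba
  else
    -- out = [None] * 256: every slot is overwritten by the loop, so a placeholder tuple stands for None
    ((PySem.List.pyRange 0 256 32).foldl (pvStepA palette_rgba) (List.replicate 256 (0, 0, 0, 0), 0)).1

-- ===== PORT B =====
def pvSrc (i : Int) : Int :=
  let loc := PySem.Int.mod i 32
  if 8 ≤ loc ∧ loc < 16 then i + 8
  else if 16 ≤ loc ∧ loc < 24 then i - 8
  else i

def unswizzle_palette_py_alt (palette_rgba : List (Int × Int × Int × Int)) : List (Int × Int × Int × Int) :=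
  if palette_rgba.length ≠ 256 then palette_rgba
  else
    let perm := (PySem.List.pyRange 0 256 1).map pvSrc
    -- palette_rgba[p]: always in range under the length-256 guard, so the default is never used
    perm.map (fun p => (PySem.List.pyGet? palette_rgba p).getD (0, 0, 0, 0))

-- ===== PRECONDITION & SPEC =====
def Spec_unswizzle_palette_py (palette_rgba : List (Int × Int × Int × Int)) (out : List (Int × Int × Int × Int)) : Prop := out = unswizzle_palette_py_alt palette_rgba
instance (palette_rgba : List (Int × Int × Int × Int)) (out : List (Int × Int × Int × Int)) : Decidable (Spec_unswizzle_palette_py palette_rgba out) := by unfold Spec_unswizzle_palette_py; infer_instance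

-- ===== CLAIM (what is proved, stated in full; the proofs are below) =====
def Claim_equal_unswizzle_palette_py : Prop := ∀ (palette_rgba : List (Int × Int × Int × Int)), Dom_unswizzle_palette_py palette_rgba → Spec_unswizzle_palette_py palette_rgba (unswizzle_palette_py palette_rgba)

-- ===== LEMMAS AND PROOFS =====
-- The proof: both ports commute with mapping a value-transformation over the palette (as long as it
-- fixes the placeholder), both applied to the concrete "index list" pvI agree by kernel computation,
-- and every length-256 list is the image of pvI under such a transformation.

-- the index list: entry k carries the tag k+1 (0 is reserved for the placeholder)
def pvI : List (Int × Int × Int × Int) := (List.range 256).map (fun k => (Int.ofNat k + 1, 0, 0, 0))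

-- the value-transformation rebuilding xs from pvI
def pvG (xs : List (Int × Int × Int × Int)) (t : Int × Int × Int × Int) : Int × Int × Int × Int :=
  if t.1 = 0 then (0, 0, 0, 0) else xs.getD (t.1 - 1).toNat (0, 0, 0, 0)


set_option maxRecDepth 4000

theorem pvI_length : pvI.length = 256 := by
  unfold pvI
  rw [List.length_map, List.length_range]

theorem pv_rebuild (xs : List (Int × Int × Int × Int)) (h : xs.length = 256) :
    pvI.map (pvG xs) = xs := by
  apply List.ext_getElem
  · rw [List.length_map, pvI_length, h]
  · intro k h1 h2
    simp only [pvI, List.getElem_map, List.getElem_range, pvG, Int.ofNat_eq_natCast]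
    have hne : ¬((k : Int) + 1 = 0) := by omega
    simp only [hne, if_false]
    have ht : ((k : Int) + 1 - 1).toNat = k := by omega
    rw [ht, List.getD_eq_getElem xs _ (by omega)]

theorem pv_slice_map (f : (Int × Int × Int × Int) → (Int × Int × Int × Int))
    (xs : List (Int × Int × Int × Int)) (a b : Option Int) :
    PySem.List.slice (xs.map f) a b = (PySem.List.slice xs a b).map f := by
  cases a <;> cases b <;> simp [PySem.List.slice, List.map_take, List.map_drop]

theorem pv_sliceAssign_map (f : (Int × Int × Int × Int) → (Int × Int × Int × Int))
    (out seg : List (Int × Int × Int × Int)) (a b : Nat) :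
    pvSliceAssign (out.map f) a b (seg.map f) = (pvSliceAssign out a b seg).map f := by
  simp [pvSliceAssign, List.map_append, List.map_take, List.map_drop]

theorem pv_step_map (f : (Int × Int × Int × Int) → (Int × Int × Int × Int))
    (pal out : List (Int × Int × Int × Int)) (j i : Int) :
    pvStepA (pal.map f) (out.map f, j) i = ((pvStepA pal (out, j) i).1.map f, (pvStepA pal (out, j) i).2) := by
  simp only [pvStepA, pv_slice_map, pv_sliceAssign_map]

theorem pv_fold_map (f : (Int × Int × Int × Int) → (Int × Int × Int × Int))
    (pal : List (Int × Int × Int × Int)) :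
    ∀ (l : List Int) (out : List (Int × Int × Int × Int)) (j : Int),
      l.foldl (pvStepA (pal.map f)) (out.map f, j)
        = ((l.foldl (pvStepA pal) (out, j)).1.map f, (l.foldl (pvStepA pal) (out, j)).2) := by
  intro l
  induction l with
  | nil => intro out j; rfl
  | cons i l ih =>
      intro out j
      simp only [List.foldl_cons, pv_step_map]
      exact ih _ _

theorem pv_commA (f : (Int × Int × Int × Int) → (Int × Int × Int × Int))
    (hf : f (0, 0, 0, 0) = (0, 0, 0, 0))
    (xs : List (Int × Int × Int × Int)) (h : xs.length = 256) :
    unswizzle_palette_py (xs.map f) = (unswizzle_palette_py xs).map f := by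
  unfold unswizzle_palette_py
  simp only [List.length_map, h, ne_eq, not_true_eq_false, if_false]
  have hrep : (List.replicate 256 ((0 : Int), (0 : Int), (0 : Int), (0 : Int))).map f
      = List.replicate 256 (0, 0, 0, 0) := by simp [hf]
  conv_lhs => rw [← hrep]
  rw [pv_fold_map]

theorem pv_src_bounds (i : Int) (h0 : 0 ≤ i) (h1 : i < 256) : 0 ≤ pvSrc i ∧ pvSrc i < 256 := by
  unfold pvSrc
  have hq := PySem.Int.floordiv_mul_add_mod i 32
  have hm0 : 0 ≤ PySem.Int.mod i 32 := PySem.Int.mod_nonneg i (by norm_num)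
  have hm1 : PySem.Int.mod i 32 < 32 := PySem.Int.mod_lt i (by norm_num)
  dsimp only
  split_ifs <;> omega

theorem pv_commB (f : (Int × Int × Int × Int) → (Int × Int × Int × Int))
    (xs : List (Int × Int × Int × Int)) (h : xs.length = 256) :
    unswizzle_palette_py_alt (xs.map f) = (unswizzle_palette_py_alt xs).map f := by
  unfold unswizzle_palette_py_alt
  simp only [List.length_map, h, ne_eq, not_true_eq_false, if_false, List.map_map]
  refine List.map_congr_left (fun i hi => ?_)
  have hib : 0 ≤ i ∧ i < 256 := PySem.List.mem_pyRange_one.mp hi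
  obtain ⟨hp0, hp1⟩ := pv_src_bounds i hib.1 hib.2
  simp only [Function.comp_apply]
  rw [PySem.List.pyGet?_eq_some_getElem xs hp0 (by omega),
      PySem.List.pyGet?_eq_some_getElem (xs.map f) hp0 (by rw [List.length_map]; omega)]
  simp only [Option.getD_some, List.getElem_map]

set_option maxHeartbeats 4000000 in
theorem pv_key : unswizzle_palette_py pvI = unswizzle_palette_py_alt pvI := by decide

theorem pv_main (xs : List (Int × Int × Int × Int)) :
    unswizzle_palette_py xs = unswizzle_palette_py_alt xs := by
  by_cases h : xs.length = 256
  · calc unswizzle_palette_py xs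
        = unswizzle_palette_py (pvI.map (pvG xs)) := by rw [pv_rebuild xs h]
      _ = (unswizzle_palette_py pvI).map (pvG xs) := pv_commA _ rfl _ pvI_length
      _ = (unswizzle_palette_py_alt pvI).map (pvG xs) := by rw [pv_key]
      _ = unswizzle_palette_py_alt (pvI.map (pvG xs)) := (pv_commB _ _ pvI_length).symm
      _ = unswizzle_palette_py_alt xs := by rw [pv_rebuild xs h]
  · simp only [unswizzle_palette_py, unswizzle_palette_py_alt, if_pos h]

-- ===== VERDICT (by name: the statement is the Claim_ definition above) =====
theorem unswizzle_palette_py_spec : Claim_equal_unswizzle_palette_py := by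
  intro xs _
  unfold Spec_unswizzle_palette_py
  exact pv_main xs
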